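-- pv_equiv track=rewrite | github.com/letive/simple-pond-monitoring | lib/helpers_mod/helpers.py | get_index_array
-- ===== SOURCE A (Python) =====
-- def get_index_array(data):
--     index = []
--     for i, j in enumerate(data):
--         if (i == 0) & (j[0] == 1):
--             cycle = [i]
--         elif (j[0] == 1):
--             cycle.append(i)
--             index.append(cycle)
--             cycle = [i]
--         else:
--             pass
--     index.append(cycle)
--     return index
-- ===== SOURCE B (Python) =====
-- def get_index_array(data):
--     markers = [i for i, row in enumerate(data) if row[0] == 1]
--     pairs = [[a, b] for a, b in zip(markers, markers[1:])]
--     return pairs + [[markers[-1]]]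
-- ===== Notes on version B (the rewrite author's own statement) =====
-- stated objective: simpler
-- what changed: B first extracts the list of marker indices (rows whose first entry is 1) in one comprehension, then builds the cycles as pairwise zips of consecutive markers plus a final singleton, instead of A's stateful loop carrying a mutable 'cycle' accumulator.
-- crash fix: On inputs whose rows are all nonempty and that contain a marker row but whose first row is not a marker, A raises UnboundLocalError (its 'cycle' variable is only bound at index 0) while B returns the cycles over the markers it found. — e.g. on get_index_array([[0], [1], [2], [1]]): A raises UnboundLocalError, B returns [[1, 3], [3]]
import Mathlib
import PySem

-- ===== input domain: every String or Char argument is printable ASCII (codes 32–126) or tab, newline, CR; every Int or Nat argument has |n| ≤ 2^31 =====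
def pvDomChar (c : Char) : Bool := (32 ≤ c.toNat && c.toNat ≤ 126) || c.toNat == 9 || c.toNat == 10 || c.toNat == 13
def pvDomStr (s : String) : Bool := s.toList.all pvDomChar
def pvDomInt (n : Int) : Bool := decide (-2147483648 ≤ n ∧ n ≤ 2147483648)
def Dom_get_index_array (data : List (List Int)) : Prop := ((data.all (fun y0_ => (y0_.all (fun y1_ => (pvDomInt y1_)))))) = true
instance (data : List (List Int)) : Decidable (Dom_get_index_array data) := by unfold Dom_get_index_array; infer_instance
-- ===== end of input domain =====

-- B replaces A's stateful loop (a mutable running 'cycle') by extracting the marker indices once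
-- and zipping consecutive markers into pairs; objective: simpler.


-- ===== PORT A =====
-- j[0]; under Pre_ every row is nonempty so the default 0 is never used
def pvHead0 (j : List Int) : Int := (PySem.List.pyGet? j 0).getD 0

-- A's loop body: state = (index, cycle); cycle is Option since Python leaves it unbound initially
def pvAStep (s : List (List Int) × Option (List Int)) (p : Int × List Int) :
    List (List Int) × Option (List Int) :=
  if p.1 == 0 && pvHead0 p.2 == 1 then (s.1, some [p.1])
  else if pvHead0 p.2 == 1 then (s.1 ++ [s.2.getD [] ++ [p.1]], some [p.1])
  else s

def get_index_array (data : List (List Int)) : List (List Int) :=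
  let s := (PySem.List.enumerate data).foldl pvAStep ([], none)
  s.1 ++ [s.2.getD []]

-- ===== PORT B =====
def get_index_array_alt (data : List (List Int)) : List (List Int) :=
  let markers := ((PySem.List.enumerate data).filter (fun p => pvHead0 p.2 == 1)).map (·.1)
  let pairs := (markers.zip markers.tail).map (fun p => [p.1, p.2])
  pairs ++ [[(PySem.List.pyGet? markers (-1)).getD 0]]

-- ===== PRECONDITION & SPEC =====
-- Pre_ excludes exactly the inputs on which A raises: an empty row anywhere (IndexError on j[0]),
-- and empty data / first row not a marker (UnboundLocalError: 'cycle' only bound at index 0).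
def Pre_get_index_array (data : List (List Int)) : Prop :=
  (∀ r ∈ data, r ≠ []) ∧ data ≠ [] ∧ pvHead0 data.headI = 1
instance (data : List (List Int)) : Decidable (Pre_get_index_array data) := by
  unfold Pre_get_index_array; infer_instance

def pvWitness_get_index_array : List (List Int) := [[1], [0, 5], [1, 2], [1]]

-- On inputs whose rows are all nonempty and that contain a marker row but whose first row is not a
-- marker, A raises UnboundLocalError while B returns the cycles over the markers it found.
def Raises_get_index_array (data : List (List Int)) : Prop :=
  (∀ r ∈ data, r ≠ []) ∧ (∃ r ∈ data, pvHead0 r = 1) ∧ pvHead0 data.headI ≠ 1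
instance (data : List (List Int)) : Decidable (Raises_get_index_array data) := by
  unfold Raises_get_index_array; infer_instance

def pvRaiseWitness_get_index_array : List (List Int) := [[0], [1], [2], [1]]
def pvRaiseWitnessOut_get_index_array : List (List Int) := [[1, 3], [3]]

def Spec_get_index_array (data : List (List Int)) (out : List (List Int)) : Prop := out = get_index_array_alt data
instance (data : List (List Int)) (out : List (List Int)) : Decidable (Spec_get_index_array data out) := by unfold Spec_get_index_array; infer_instance

-- ===== CLAIM (what is proved, stated in full; the proofs are below) =====
def Claim_equal_get_index_array : Prop := ∀ (data : List (List Int)), Dom_get_index_array data → Pre_get_index_array data → Spec_get_index_array data (get_index_array data)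
def Claim_raises_get_index_array : Prop := (∀ (data : List (List Int)), Dom_get_index_array data → Raises_get_index_array data → ¬ Pre_get_index_array data) ∧ (Dom_get_index_array (pvRaiseWitness_get_index_array) ∧ Raises_get_index_array (pvRaiseWitness_get_index_array) ∧ get_index_array_alt (pvRaiseWitness_get_index_array) = pvRaiseWitnessOut_get_index_array)

-- ===== LEMMAS AND PROOFS =====

-- closed description of A's fold on a suffix whose indices are all ≥ 1, in terms of the
-- markers (filtered indices) of that suffix
def pvGlue (c : List Int) : List Int → List (List Int)
  | [] => []
  | m :: rest => (c ++ [m]) :: pvGlue [m] rest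

def pvLastC (c : List Int) : List Int → List Int
  | [] => c
  | m :: rest => pvLastC [m] rest

theorem pvFoldA (rs : List (List Int)) :
    ∀ (n : Int), 1 ≤ n → ∀ (idx : List (List Int)) (c : List Int),
    (PySem.List.enumerate rs n).foldl pvAStep (idx, some c)
      = (idx ++ pvGlue c (((PySem.List.enumerate rs n).filter (fun p => pvHead0 p.2 == 1)).map (·.1)),
         some (pvLastC c (((PySem.List.enumerate rs n).filter (fun p => pvHead0 p.2 == 1)).map (·.1)))) := by
  induction rs with
  | nil => intro n _ idx c; simp [PySem.List.enumerate_nil, pvGlue, pvLastC]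
  | cons r rs ih =>
    intro n hn idx c
    rw [PySem.List.enumerate_cons]
    have hne : (n == 0) = false := by simp; omega
    simp only [List.foldl_cons, List.filter_cons]
    by_cases hm : pvHead0 r == 1
    · rw [show pvAStep (idx, some c) (n, r) = (idx ++ [c ++ [n]], some [n]) from by
        simp [pvAStep, hne, hm]]
      rw [ih (n + 1) (by omega)]
      simp [hm, pvGlue, pvLastC]
    · rw [show pvAStep (idx, some c) (n, r) = (idx, some c) from by simp [pvAStep, hne, hm]]
      rw [ih (n + 1) (by omega)]
      simp [hm]

theorem pvPairs_glue (ms : List Int) : ∀ (a : Int),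
    (((a :: ms).zip ms).map (fun p => [p.1, p.2])) = pvGlue [a] ms := by
  induction ms with
  | nil => intro a; simp [pvGlue]
  | cons m rest ih => intro a; simp [pvGlue, ih m]

theorem pvLastC_eq (ms : List Int) : ∀ (a : Int),
    pvLastC [a] ms = [(a :: ms).getLastD 0] := by
  induction ms with
  | nil => intro a; simp [pvLastC]
  | cons m rest ih => intro a; simpa [pvLastC] using ih m

-- ===== VERDICT (by name: the statement is the Claim_ definition above) =====
theorem get_index_array_spec : Claim_equal_get_index_array := by
  intro data _ hpre
  unfold Spec_get_index_array
  obtain ⟨hrows, hne, hhead⟩ := hpre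
  match data with
  | [] => exact absurd rfl hne
  | r :: rs =>
    have hr : pvHead0 r = 1 := hhead
    unfold get_index_array get_index_array_alt
    rw [PySem.List.enumerate_cons]
    simp only [List.foldl_cons, List.filter_cons]
    rw [show pvAStep ([], none) (0, r) = ([], some [(0 : Int)]) from by simp [pvAStep, hr]]
    simp only [hr, show ((0:Int)+1) = 1 from rfl, beq_self_eq_true, if_true, List.map_cons,
      List.tail_cons]
    rw [pvFoldA rs 1 (by omega)]
    set ms := ((PySem.List.enumerate rs 1).filter (fun p => pvHead0 p.2 == 1)).map (·.1) with hms
    rw [pvPairs_glue, pvLastC_eq]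
    rw [PySem.List.pyGet?_neg_one]
    simp [List.getLastD_eq_getLast?]

@[simp] theorem get_index_array_raises : Claim_raises_get_index_array := by
  unfold Claim_raises_get_index_array
  refine ⟨?_, by decide⟩
  intro data _ hr hp
  exact hr.2.2 hp.2.2
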